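-- pv_equiv track=rewrite | github.com/JadielTeofilo/General-Algorithms | src/leetcode/min_diff_in_sums_after_removal.py | build_prefix
-- ===== SOURCE A (Python) =====
-- import collections
-- import heapq
-- from typing import List
--
-- HeapValue = collections.namedtuple('HeapValue', 'index value')
--
-- def build_prefix(nums: List[int]) -> List[int]:
--     prefix: List[int] = [0] * len(nums)
--     group_size: int = len(nums)//3
--     max_heap: List[HeapValue] = [HeapValue(-n, n)
--                                  for n in nums[:group_size]]
--     heapq.heapify(max_heap)
--     prefix[group_size] = sum(nums[:group_size])
--     for i in range(group_size + 1, len(nums) - group_size + 1):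
--         heapq.heappush(max_heap, HeapValue(-nums[i-1], nums[i-1]))
--         prefix[i] = (prefix[i-1] - heapq.heappop(max_heap).value +
--                      nums[i-1])
--     return prefix
-- ===== SOURCE B (Python) =====
-- from typing import List
--
--
-- def build_prefix(nums: List[int]) -> List[int]:
--     n = len(nums)
--     g = n // 3
--     return [sum(sorted(nums[:i])[:g]) if g <= i <= n - g else 0
--             for i in range(n)]
-- ===== Notes on version B (the rewrite author's own statement) =====
-- stated objective: simpler
-- what changed: Replaces the incremental max-heap (heapify, push/pop per step) with a single list comprehension that recomputes the sum of the group_size smallest elements of each prefix from scratch via sorted()[:group_size].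
import Mathlib
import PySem

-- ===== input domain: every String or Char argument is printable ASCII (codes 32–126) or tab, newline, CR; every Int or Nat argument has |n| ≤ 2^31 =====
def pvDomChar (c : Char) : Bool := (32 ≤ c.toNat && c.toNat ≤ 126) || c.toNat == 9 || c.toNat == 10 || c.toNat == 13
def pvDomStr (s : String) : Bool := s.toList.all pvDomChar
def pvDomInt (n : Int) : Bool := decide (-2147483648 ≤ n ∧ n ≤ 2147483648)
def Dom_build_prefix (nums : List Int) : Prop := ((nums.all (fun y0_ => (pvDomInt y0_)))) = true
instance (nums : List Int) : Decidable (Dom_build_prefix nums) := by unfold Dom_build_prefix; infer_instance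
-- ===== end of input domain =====

-- B replaces A's incremental max-heap with a per-index recomputation of the sum of the
-- group_size smallest elements of each prefix (sort, take, sum): simpler, not faster.

-- ===== PORT A =====
-- heapq on HeapValue(-n, n): heappop returns (and removes) a maximal value of the heap's
-- multiset (tied HeapValues carry the same value, so which occurrence goes is unobservable).
def pvPopMax (h : List Int) : Int × List Int :=
  match h.max? with
  | none => (0, [])          -- heappop on an empty heap raises; unreachable inside Pre_
  | some m => (m, h.erase m)

-- the body of A's for-loop (st = (prefix, max_heap), i the loop index)
def pvStep (nums : List Int) (st : List Int × List Int) (i : Nat) : List Int × List Int :=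
  let v := nums.getD (i - 1) 0                       -- nums[i-1], in range inside Pre_
  let p := pvPopMax (v :: st.2)                      -- heappush then heappop
  (st.1.set i (st.1.getD (i - 1) 0 - p.1 + v), p.2)  -- prefix[i] = prefix[i-1] - popped + nums[i-1]

def build_prefix (nums : List Int) : List Int :=
  let n := nums.length
  let group_size := n / 3
  let max_heap := nums.take group_size
  let prefix0 := (List.replicate n (0 : Int)).set group_size ((nums.take group_size).sum)
  let st := (List.range' (group_size + 1) (n - 2 * group_size)).foldl (pvStep nums)
              (prefix0, max_heap)
  st.1

-- ===== PORT B =====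
def build_prefix_alt (nums : List Int) : List Int :=
  let n := nums.length
  let g := n / 3
  (List.range n).map (fun i =>
    if g ≤ i ∧ i ≤ n - g then ((PySem.List.sorted (nums.take i) (fun x => x)).take g).sum
    else 0)

-- ===== PRECONDITION & SPEC =====
-- A raises IndexError on lists of length < 3 (prefix[group_size] or the loop writes past the end).
def Pre_build_prefix (nums : List Int) : Prop := 3 ≤ nums.length
instance (nums : List Int) : Decidable (Pre_build_prefix nums) := by
  unfold Pre_build_prefix; infer_instance

def pvWitness_build_prefix : List Int := [1, 2, 3]

def Spec_build_prefix (nums : List Int) (out : List Int) : Prop := out = build_prefix_alt nums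
instance (nums : List Int) (out : List Int) : Decidable (Spec_build_prefix nums out) := by
  unfold Spec_build_prefix; infer_instance

-- ===== CLAIM (what is proved, stated in full; the proofs are below) =====
def Claim_equal_build_prefix : Prop := ∀ (nums : List Int), Dom_build_prefix nums →
  Pre_build_prefix nums → Spec_build_prefix nums (build_prefix nums)

-- ===== LEMMAS AND PROOFS =====

-- abbreviations used only by the proofs
def pvS (l : List Int) : List Int := PySem.List.sorted l (fun x => x)
def pvSmall (nums : List Int) (g i : Nat) : Int := ((pvS (nums.take i)).take g).sum
def pvExp (nums : List Int) (g n j : Nat) : List Int :=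
  (List.range n).map (fun t => if g ≤ t ∧ t ≤ j then pvSmall nums g t else 0)

theorem pvMax?_perm {l l' : List Int} (h : l.Perm l') : l.max? = l'.max? := by
  cases hl : l.max? with
  | none =>
    rw [List.max?_eq_none_iff] at hl
    subst hl
    have : l' = [] := h.symm.eq_nil
    simp [this]
  | some m =>
    rw [List.max?_eq_some_iff] at hl
    symm
    rw [List.max?_eq_some_iff]
    exact ⟨h.mem_iff.mp hl.1, fun b hb => hl.2 b (h.mem_iff.mpr hb)⟩

theorem pvFoldlMax_le : ∀ (x : List Int) (v b : Int), v ≤ b → (∀ y ∈ x, y ≤ b) →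
    x.foldl max v ≤ b := by
  intro x
  induction x with
  | nil => intro v b hv _; simpa using hv
  | cons c x' ih =>
    intro v b hv h
    show (x'.foldl max (max v c)) ≤ b
    exact ih _ _ (max_le hv (h c (by simp))) (fun y hy => h y (by simp [hy]))

theorem pvFoldlMax_concat (x : List Int) (b v : Int) (hvb : v ≤ b) (hall : ∀ y ∈ x, y ≤ b) :
    (x ++ [b]).foldl max v = b := by
  rw [List.foldl_append]
  show max (x.foldl max v) b = b
  exact max_eq_right (pvFoldlMax_le x v b hvb hall)

-- key step: popping the max from v :: (the k smallest of sorted s) leaves the k smallest of s∪{v}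
theorem pvKey : ∀ (s : List Int), s.Pairwise (· ≤ ·) → ∀ (k : Nat), k ≤ s.length → ∀ (v : Int),
    (((s.take k).foldl max v) :: (List.orderedInsert (· ≤ ·) v s).take k).Perm (v :: s.take k) := by
  intro s
  induction s with
  | nil =>
    intro _ k hk v
    have : k = 0 := by simpa using hk
    subst this
    simp
  | cons a s' ih =>
    intro hp k hk v
    cases k with
    | zero => simp
    | succ k' =>
      have hk'' : k' < (a :: s').length := hk
      have hts : (a :: s').take (k' + 1) = (a :: s').take k' ++ [(a :: s')[k']] := by
        rw [List.take_add_one, List.getElem?_eq_getElem hk'']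
        rfl
      by_cases hva : v ≤ a
      · rw [List.orderedInsert_cons_of_le _ _ hva]
        have hb : v ≤ (a :: s')[k'] := by
          have hmem : (a :: s')[k'] ∈ a :: s' := List.getElem_mem _
          rcases List.mem_cons.mp hmem with h | h
          · rw [h]; exact hva
          · exact le_trans hva ((List.pairwise_cons.mp hp).1 _ h)
        have hall : ∀ y ∈ (a :: s').take k', y ≤ (a :: s')[k'] := by
          intro y hy
          obtain ⟨j, hj, rfl⟩ := List.mem_take_iff_getElem.mp hy
          have hjk : j < k' := lt_of_lt_of_le (Nat.lt_min.mp hj).1 (le_refl _)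
          exact List.pairwise_iff_getElem.mp hp j k' (lt_trans hjk hk'') hk'' hjk
        have hfold : ((a :: s').take (k' + 1)).foldl max v = (a :: s')[k'] := by
          rw [hts]
          exact pvFoldlMax_concat _ _ _ hb hall
        rw [hfold]
        have h2 : (v :: a :: s').take (k' + 1) = v :: (a :: s').take k' := rfl
        rw [h2, hts]
        exact (List.Perm.swap _ _ _).trans
          (((List.perm_append_singleton _ _).symm).cons v)
      · rw [List.orderedInsert_of_not_le _ _ hva]
        have hmax : ((a :: s').take (k' + 1)).foldl max v = (s'.take k').foldl max v := by
          show (s'.take k').foldl max (max v a) = _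
          rw [max_eq_left (le_of_not_ge hva)]
        rw [hmax]
        have htk : (a :: List.orderedInsert (· ≤ ·) v s').take (k' + 1)
            = a :: (List.orderedInsert (· ≤ ·) v s').take k' := rfl
        rw [htk]
        have h1 : (a :: s').take (k' + 1) = a :: s'.take k' := rfl
        rw [h1]
        have ihh := ih hp.of_cons k' (by simpa using hk) v
        exact (List.Perm.swap _ _ _).trans ((ihh.cons a).trans (List.Perm.swap _ _ _))

theorem pvSorted_concat (l : List Int) (v : Int) :
    pvS (l ++ [v]) = List.orderedInsert (· ≤ ·) v (pvS l) := by
  unfold pvS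
  apply PySem.List.sorted_id_eq_of_perm_of_pairwise
  · exact (List.perm_orderedInsert _ _ _).trans
      (((PySem.List.sorted_perm l (fun x => x) false).cons v).trans
        (List.perm_append_singleton v l).symm)
  · exact List.Pairwise.orderedInsert v _ (PySem.List.sorted_pairwise l (fun x => x))

theorem pvPop_spec (s : List Int) (hs : s.Pairwise (· ≤ ·)) (k : Nat) (hk : k ≤ s.length)
    (v : Int) (heap : List Int) (hp : heap.Perm (s.take k)) :
    (pvPopMax (v :: heap)).2.Perm ((List.orderedInsert (· ≤ ·) v s).take k) ∧
    (pvPopMax (v :: heap)).1 + (pvPopMax (v :: heap)).2.sum = v + (s.take k).sum := by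
  have hperm : (v :: heap).Perm (v :: s.take k) := hp.cons v
  have hmax : (v :: heap).max? = some ((s.take k).foldl max v) := by
    rw [pvMax?_perm hperm]; rfl
  have hpop : pvPopMax (v :: heap)
      = ((s.take k).foldl max v, (v :: heap).erase ((s.take k).foldl max v)) := by
    unfold pvPopMax; rw [hmax]
  have hMmem : (s.take k).foldl max v ∈ v :: s.take k :=
    List.max?_mem (xs := v :: s.take k) rfl
  have hce : (v :: s.take k).Perm
      ((s.take k).foldl max v :: (v :: s.take k).erase ((s.take k).foldl max v)) :=
    List.perm_cons_erase hMmem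
  have hKey := pvKey s hs k hk v
  have he : ((v :: heap).erase ((s.take k).foldl max v)).Perm
      ((v :: s.take k).erase ((s.take k).foldl max v)) := hperm.erase _
  have hOI : ((List.orderedInsert (· ≤ ·) v s).take k).Perm
      ((v :: s.take k).erase ((s.take k).foldl max v)) :=
    (hKey.trans hce).cons_inv
  constructor
  · rw [hpop]
    exact (he.trans hOI.symm)
  · rw [hpop]
    have h1 : ((s.take k).foldl max v :: (v :: s.take k).erase ((s.take k).foldl max v)).sum
        = (v :: s.take k).sum := hce.symm.sum_eq
    have h2 : ((v :: heap).erase ((s.take k).foldl max v)).sum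
        = ((v :: s.take k).erase ((s.take k).foldl max v)).sum := he.sum_eq
    simp only [List.sum_cons] at h1 ⊢
    omega

theorem pvLenS (l : List Int) : (pvS l).length = l.length := by
  unfold pvS; exact PySem.List.length_sorted l _ false

theorem pvSmall_all (nums : List Int) (g : Nat) (hg : g ≤ nums.length) :
    pvSmall nums g g = (nums.take g).sum := by
  unfold pvSmall
  have hlen : (pvS (nums.take g)).length ≤ g := by
    rw [pvLenS, List.length_take]; omega
  rw [List.take_of_length_le hlen]
  exact List.Perm.sum_eq (by unfold pvS; exact PySem.List.sorted_perm _ _ _)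

-- loop invariant of A: after j iterations the prefix list carries the small-sums up to
-- index group_size+j, and the heap holds (a permutation of) the group_size smallest
-- elements of nums[:group_size+j]
theorem pvInv (nums : List Int) (h3 : 3 ≤ nums.length) :
    ∀ j, j ≤ nums.length - 2 * (nums.length / 3) →
    ∃ heap : List Int,
      (List.range' (nums.length / 3 + 1) j).foldl (pvStep nums)
        (((List.replicate nums.length (0 : Int)).set (nums.length / 3)
            ((nums.take (nums.length / 3)).sum)), nums.take (nums.length / 3))
        = (pvExp nums (nums.length / 3) nums.length (nums.length / 3 + j), heap)
      ∧ heap.Perm ((pvS (nums.take (nums.length / 3 + j))).take (nums.length / 3)) := by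
  set n := nums.length with hn
  set g := n / 3 with hg
  have hg1 : 1 ≤ g := by omega
  have hg3 : 3 * g ≤ n := by omega
  intro j
  induction j with
  | zero =>
    intro _
    refine ⟨nums.take g, ?_, ?_⟩
    · simp only [List.range'_zero, List.foldl_nil, Nat.add_zero]
      congr 1
      apply List.ext_getElem
      · simp [pvExp]
      · intro t ht1 ht2
        simp only [List.getElem_set, List.getElem_replicate, pvExp, List.getElem_map,
          List.getElem_range]
        by_cases hgt : g = t
        · subst hgt
          rw [if_pos rfl, if_pos ⟨le_refl _, le_refl _⟩]
          exact (pvSmall_all nums g (by omega)).symm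
        · rw [if_neg hgt, if_neg (by omega)]
    · rw [Nat.add_zero]
      have hlen : (pvS (nums.take g)).length ≤ g := by
        rw [pvLenS, List.length_take]; omega
      rw [List.take_of_length_le hlen]
      unfold pvS
      exact (PySem.List.sorted_perm _ _ _).symm
  | succ j ih =>
    intro hj1
    obtain ⟨heap, hfold, hperm⟩ := ih (by omega)
    have hgj : g + j < n := by omega
    have hstep : List.range' (g + 1) (j + 1) = List.range' (g + 1) j ++ [g + 1 + j] := by
      rw [List.range'_concat]; simp
    rw [hstep, List.foldl_append, hfold, List.foldl_cons, List.foldl_nil]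
    have hi1 : g + 1 + j - 1 = g + j := by omega
    have hv : nums.getD (g + 1 + j - 1) 0 = nums[g + j] := by
      rw [hi1]; exact List.getD_eq_getElem _ _ hgj
    have hsp : (pvS (nums.take (g + j))).Pairwise (· ≤ ·) :=
      PySem.List.sorted_pairwise _ _
    have hsl : g ≤ (pvS (nums.take (g + j))).length := by
      rw [pvLenS, List.length_take]; omega
    obtain ⟨hp2, hsum⟩ := pvPop_spec (pvS (nums.take (g + j))) hsp g hsl nums[g + j] heap hperm
    have htk1 : nums.take (g + j) ++ [nums[g + j]] = nums.take (g + j + 1) := by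
      rw [List.take_add_one, List.getElem?_eq_getElem hgj]; rfl
    have hp2' : (pvPopMax (nums[g + j] :: heap)).2.Perm
        ((pvS (nums.take (g + j + 1))).take g) := by
      rw [← htk1, pvSorted_concat]
      exact hp2
    have hlenExp : (pvExp nums g n (g + j)).length = n := by simp [pvExp]
    have hgd : (pvExp nums g n (g + j)).getD (g + 1 + j - 1) 0 = pvSmall nums g (g + j) := by
      rw [hi1, List.getD_eq_getElem _ _ (by rw [hlenExp]; exact hgj)]
      simp only [pvExp, List.getElem_map, List.getElem_range]
      rw [if_pos ⟨by omega, le_refl _⟩]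
    have hval : pvSmall nums g (g + j) - (pvPopMax (nums[g + j] :: heap)).1 + nums[g + j]
        = pvSmall nums g (g + j + 1) := by
      have h1 : pvSmall nums g (g + j + 1) = (pvPopMax (nums[g + j] :: heap)).2.sum :=
        (List.Perm.sum_eq hp2').symm
      have h2 : ((pvS (nums.take (g + j))).take g).sum = pvSmall nums g (g + j) := rfl
      omega
    refine ⟨(pvPopMax (nums[g + j] :: heap)).2, ?_, hp2'⟩
    simp only [pvStep]
    rw [hv, hgd, hval]
    congr 1
    apply List.ext_getElem
    · simp [pvExp]
    · intro t ht1 ht2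
      simp only [List.getElem_set, pvExp, List.getElem_map, List.getElem_range]
      by_cases hti : g + 1 + j = t
      · rw [if_pos hti, if_pos (by omega)]
        subst hti
        congr 1
        omega
      · rw [if_neg hti]
        split_ifs with c1 c2 c3 <;> first | rfl | omega

-- ===== VERDICT (by name: the statement is the Claim_ definition above) =====
theorem build_prefix_spec : Claim_equal_build_prefix := by
  intro nums _ hpre
  unfold Pre_build_prefix at hpre
  unfold Spec_build_prefix
  obtain ⟨heap, hfold, _⟩ :=
    pvInv nums hpre (nums.length - 2 * (nums.length / 3)) le_rfl
  show ((List.range' (nums.length / 3 + 1) (nums.length - 2 * (nums.length / 3))).foldl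
      (pvStep nums)
      (((List.replicate nums.length (0 : Int)).set (nums.length / 3)
          ((nums.take (nums.length / 3)).sum)), nums.take (nums.length / 3))).1
      = build_prefix_alt nums
  rw [hfold]
  have he : nums.length / 3 + (nums.length - 2 * (nums.length / 3))
      = nums.length - nums.length / 3 := by omega
  show pvExp nums (nums.length / 3) nums.length
      (nums.length / 3 + (nums.length - 2 * (nums.length / 3))) = build_prefix_alt nums
  rw [he]
  simp only [pvExp, pvSmall, pvS, build_prefix_alt]
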